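-- pv_equiv track=rewrite | github.com/carlosekluiz-cell/ENLACE | python/pipeline/flows/transparencia_fust.py | _generate_month_range
-- ===== SOURCE A (Python) =====
-- def _generate_month_range(
--     start_year: int, start_month: int, end_year: int, end_month: int
-- ) -> list[tuple[int, int]]:
--     """Generate list of (year, month) tuples for the date range."""
--     months = []
--     y, m = start_year, start_month
--     while (y, m) <= (end_year, end_month):
--         months.append((y, m))
--         m += 1
--         if m > 12:
--             m = 1
--             y += 1
--     return months
-- ===== SOURCE B (Python) =====
-- def _generate_month_range(
--     start_year: int, start_month: int, end_year: int, end_month: int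
-- ) -> list[tuple[int, int]]:
--     """Generate list of (year, month) tuples for the date range."""
--     months = []
--     # walk the start year month by month
--     m = start_month
--     while (start_year, m) <= (end_year, end_month):
--         months.append((start_year, m))
--         m += 1
--         if m > 12:
--             break
--     if end_year > start_year:
--         # the years after the start year, as absolute month indices
--         months += [(i // 12, i % 12 + 1)
--                    for i in range((start_year + 1) * 12, end_year * 12)]
--         # the end year, capped at December
--         months += [(end_year, m) for m in range(1, min(end_month, 12) + 1)]
--     return months
-- ===== Notes on version B (the rewrite author's own statement) =====
-- stated objective: alternative
-- what changed: Replaces A's single carry/rollover while-loop state machine by a three-phase decomposition: walk only the start year month by month, bulk-generate the intervening full years from one arithmetic range of absolute month indices (year*12+month-1 decoded back to (year, month)), and a bounded comprehension for the end year.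
import Mathlib
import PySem

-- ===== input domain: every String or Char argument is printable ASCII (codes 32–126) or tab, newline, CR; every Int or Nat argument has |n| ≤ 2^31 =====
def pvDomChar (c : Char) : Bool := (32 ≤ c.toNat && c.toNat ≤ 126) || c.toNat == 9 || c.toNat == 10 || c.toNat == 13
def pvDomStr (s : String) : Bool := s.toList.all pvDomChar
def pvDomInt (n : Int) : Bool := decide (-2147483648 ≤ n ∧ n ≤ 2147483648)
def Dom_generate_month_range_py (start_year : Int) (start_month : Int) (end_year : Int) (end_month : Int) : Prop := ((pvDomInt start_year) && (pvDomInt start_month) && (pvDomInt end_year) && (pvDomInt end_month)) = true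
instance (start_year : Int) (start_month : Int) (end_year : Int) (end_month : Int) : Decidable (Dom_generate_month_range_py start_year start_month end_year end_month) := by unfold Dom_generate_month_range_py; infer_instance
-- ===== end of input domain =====

-- B replaces A's single carry/rollover while-loop by a three-phase decomposition:
-- walk the start year month by month, bulk-generate the middle years from absolute
-- month indices, and a comprehension for the end year (alternative decomposition, same cost).

-- ===== PORT A =====
-- A's while loop; the condition is Python's tuple comparison (y, m) <= (end_year, end_month)
def pvGoA (ey em y m : Int) : List (Int × Int) :=
  if h : y < ey ∨ (y = ey ∧ m ≤ em) then
    (y, m) :: (if m + 1 > 12 then pvGoA ey em (y + 1) 1 else pvGoA ey em y (m + 1))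
  else []
termination_by ((ey + 1 - y).toNat, (13 - m).toNat)
decreasing_by
  · exact Prod.Lex.left _ _ (by omega)
  · exact Prod.Lex.right _ (by omega)

def generate_month_range_py (start_year : Int) (start_month : Int) (end_year : Int) (end_month : Int) : List (Int × Int) :=
  pvGoA end_year end_month start_year start_month

-- ===== PORT B =====
-- B's first phase: while (start_year, m) <= (end_year, end_month): append; m += 1; if m > 12: break
def pvStartRun (sy ey em m : Int) : List (Int × Int) :=
  if h : sy < ey ∨ (sy = ey ∧ m ≤ em) then
    (sy, m) :: (if m + 1 > 12 then [] else pvStartRun sy ey em (m + 1))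
  else []
termination_by (13 - m).toNat
decreasing_by omega

def generate_month_range_py_alt (start_year : Int) (start_month : Int) (end_year : Int) (end_month : Int) : List (Int × Int) :=
  let months := pvStartRun start_year end_year end_month start_month
  if end_year > start_year then
    (months ++
      (PySem.List.pyRange ((start_year + 1) * 12) (end_year * 12) 1).map
        (fun i => (PySem.Int.floordiv i 12, PySem.Int.mod i 12 + 1))) ++
      (PySem.List.pyRange 1 (min end_month 12 + 1) 1).map (fun m => (end_year, m))
  else months

-- ===== PRECONDITION & SPEC =====
def Spec_generate_month_range_py (start_year : Int) (start_month : Int) (end_year : Int) (end_month : Int) (out : List (Int × Int)) : Prop := out = generate_month_range_py_alt start_year start_month end_year end_month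
instance (start_year : Int) (start_month : Int) (end_year : Int) (end_month : Int) (out : List (Int × Int)) : Decidable (Spec_generate_month_range_py start_year start_month end_year end_month out) := by unfold Spec_generate_month_range_py; infer_instance

-- ===== CLAIM (what is proved, stated in full; the proofs are below) =====
def Claim_equal_generate_month_range_py : Prop := ∀ (start_year : Int) (start_month : Int) (end_year : Int) (end_month : Int), Dom_generate_month_range_py start_year start_month end_year end_month → Spec_generate_month_range_py start_year start_month end_year end_month (generate_month_range_py start_year start_month end_year end_month)

-- ===== LEMMAS AND PROOFS =====

-- decoding an absolute month index that encodes (y, m) with 1 ≤ m ≤ 12 gives back (y, m)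
theorem pvDecode_eq (y m : Int) (h1 : 1 ≤ m) (h2 : m ≤ 12) :
    (PySem.Int.floordiv (y * 12 + m - 1) 12, PySem.Int.mod (y * 12 + m - 1) 12 + 1) = (y, m) := by
  have hd : PySem.Int.floordiv (y * 12 + m - 1) 12 = y := by
    rw [PySem.Int.floordiv_eq_iff_of_pos (by omega : (0:Int) < 12)]
    omega
  have hfm := PySem.Int.floordiv_mul_add_mod (y * 12 + m - 1) 12
  rw [hd] at hfm
  simp
  omega

-- from an in-range month onward, A's loop is the decoded index range up to ey*12 + max 0 (min em 12)
theorem pvGoA_index (ey em : Int) :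
    ∀ (k : Nat) (y m : Int),
      ey * 12 + max 0 (min em 12) - (y * 12 + m - 1) ≤ (k : Int) →
      1 ≤ m → m ≤ 12 →
      pvGoA ey em y m =
        (PySem.List.pyRange (y * 12 + m - 1) (ey * 12 + max 0 (min em 12)) 1).map
          (fun i => (PySem.Int.floordiv i 12, PySem.Int.mod i 12 + 1)) := by
  intro k
  induction k with
  | zero =>
    intro y m hk h1 h2
    have hstop : ey * 12 + max 0 (min em 12) ≤ y * 12 + m - 1 := by omega
    have hcond : ¬ (y < ey ∨ (y = ey ∧ m ≤ em)) := by omega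
    rw [pvGoA, dif_neg hcond, PySem.List.pyRange_one_eq_nil hstop]
    simp
  | succ n ih =>
    intro y m hk h1 h2
    by_cases hcond : y < ey ∨ (y = ey ∧ m ≤ em)
    · have hlt : y * 12 + m - 1 < ey * 12 + max 0 (min em 12) := by omega
      rw [pvGoA, dif_pos hcond, PySem.List.pyRange_one_cons hlt]
      simp only [List.map_cons]
      rw [pvDecode_eq y m h1 h2]
      by_cases hroll : m + 1 > 12
      · rw [if_pos hroll]
        have hm12 : m = 12 := by omega
        have hstep : ey * 12 + max 0 (min em 12) - ((y + 1) * 12 + 1 - 1) ≤ (n : Int) := by omega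
        rw [ih (y + 1) 1 hstep (by omega) (by omega),
          show ((y + 1) * 12 + 1 - 1 : Int) = y * 12 + m - 1 + 1 by omega]
      · rw [if_neg hroll]
        have hstep : ey * 12 + max 0 (min em 12) - (y * 12 + (m + 1) - 1) ≤ (n : Int) := by omega
        rw [ih y (m + 1) hstep (by omega) (by omega),
          show (y * 12 + (m + 1) - 1 : Int) = y * 12 + m - 1 + 1 by omega]
    · have hstop : ey * 12 + max 0 (min em 12) ≤ y * 12 + m - 1 := by omega
      rw [pvGoA, dif_neg hcond, PySem.List.pyRange_one_eq_nil hstop]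
      simp

-- A's loop is B's start-year walk, followed (when more years remain) by A's loop restarted at (sy+1, 1)
theorem pvGoA_startRun (sy ey em : Int) :
    ∀ (k : Nat) (m : Int), 13 - m ≤ (k : Int) →
      pvGoA ey em sy m =
        pvStartRun sy ey em m ++ (if sy < ey then pvGoA ey em (sy + 1) 1 else []) := by
  intro k
  induction k with
  | zero =>
    intro m hk
    have h13 : 13 ≤ m := by omega
    by_cases hcond : sy < ey ∨ (sy = ey ∧ m ≤ em)
    · rw [pvGoA, dif_pos hcond, pvStartRun, dif_pos hcond,
        if_pos (by omega : m + 1 > 12), if_pos (by omega : m + 1 > 12)]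
      rcases hcond with hlt | ⟨heq, _⟩
      · rw [if_pos hlt]; simp
      · have : ¬ (sy + 1 < ey ∨ (sy + 1 = ey ∧ (1:Int) ≤ em)) := by omega
        rw [pvGoA, dif_neg this]
        by_cases hlt : sy < ey
        · omega
        · rw [if_neg hlt]; simp
    · rw [pvGoA, dif_neg hcond, pvStartRun, dif_neg hcond]
      have hlt : ¬ sy < ey := by omega
      rw [if_neg hlt]; simp
  | succ n ih =>
    intro m hk
    by_cases hcond : sy < ey ∨ (sy = ey ∧ m ≤ em)
    · rw [pvGoA, dif_pos hcond, pvStartRun, dif_pos hcond]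
      by_cases hroll : m + 1 > 12
      · rw [if_pos hroll, if_pos hroll]
        rcases hcond with hlt | ⟨heq, _⟩
        · rw [if_pos hlt]; simp
        · have : ¬ (sy + 1 < ey ∨ (sy + 1 = ey ∧ (1:Int) ≤ em)) := by omega
          rw [pvGoA, dif_neg this]
          have hlt : ¬ sy < ey := by omega
          rw [if_neg hlt]; simp
      · rw [if_neg hroll, if_neg hroll, ih (m + 1) (by omega)]
        simp
    · rw [pvGoA, dif_neg hcond, pvStartRun, dif_neg hcond]
      have hlt : ¬ sy < ey := by omega
      rw [if_neg hlt]; simp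

-- the decoded index range of the end year equals B's end-year comprehension
theorem pvEndYear (ey em : Int) :
    ∀ (k : Nat) (j : Int), 0 ≤ j → max 0 (min em 12) - j ≤ (k : Int) →
      (PySem.List.pyRange (ey * 12 + j) (ey * 12 + max 0 (min em 12)) 1).map
          (fun i => (PySem.Int.floordiv i 12, PySem.Int.mod i 12 + 1)) =
        (PySem.List.pyRange (j + 1) (min em 12 + 1) 1).map (fun m => (ey, m)) := by
  intro k
  induction k with
  | zero =>
    intro j hj hk
    rw [PySem.List.pyRange_one_eq_nil (by omega), PySem.List.pyRange_one_eq_nil (by omega)]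
    simp
  | succ n ih =>
    intro j hj hk
    by_cases hlt : j < max 0 (min em 12)
    · have hc : min em 12 = max 0 (min em 12) := by omega
      rw [PySem.List.pyRange_one_cons
            (show ey * 12 + j < ey * 12 + max 0 (min em 12) by omega),
          PySem.List.pyRange_one_cons (show j + 1 < min em 12 + 1 by omega)]
      simp only [List.map_cons]
      rw [show (ey * 12 + j : Int) = ey * 12 + (j + 1) - 1 by omega,
        pvDecode_eq ey (j + 1) (by omega) (by omega)]
      have := ih (j + 1) (by omega) (by omega)
      rw [show (ey * 12 + (j + 1) - 1 + 1 : Int) = ey * 12 + (j + 1) by omega, this]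
    · rw [PySem.List.pyRange_one_eq_nil (by omega), PySem.List.pyRange_one_eq_nil (by omega)]
      simp

-- ===== VERDICT (by name: the statement is the Claim_ definition above) =====
theorem generate_month_range_py_spec : Claim_equal_generate_month_range_py := by
  intro sy sm ey em _hDom
  show generate_month_range_py sy sm ey em = generate_month_range_py_alt sy sm ey em
  unfold generate_month_range_py generate_month_range_py_alt
  rw [pvGoA_startRun sy ey em (13 - sm).toNat sm (by omega)]
  by_cases hlt : sy < ey
  · rw [if_pos hlt, if_pos (by omega : ey > sy)]
    have hfuel : ey * 12 + max 0 (min em 12) - ((sy + 1) * 12 + 1 - 1) ≤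
        ((ey * 12 + max 0 (min em 12) - ((sy + 1) * 12 + 1 - 1)).toNat : Int) := by omega
    rw [pvGoA_index ey em _ (sy + 1) 1 hfuel (by omega) (by omega),
      show ((sy + 1) * 12 + 1 - 1 : Int) = (sy + 1) * 12 by omega,
      PySem.List.pyRange_one_append ((sy + 1) * 12) (ey * 12) (ey * 12 + max 0 (min em 12))
        (by omega) (by omega),
      List.map_append]
    have hend := pvEndYear ey em (max 0 (min em 12)).toNat 0 le_rfl (by omega)
    rw [show (ey * 12 + (0:Int)) = ey * 12 by omega] at hend
    rw [hend, show ((0:Int) + 1) = 1 by omega, List.append_assoc]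
  · rw [if_neg hlt, if_neg (by omega : ¬ ey > sy), List.append_nil]
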